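-- pv_equiv track=rewrite | github.com/Nitesh-13/Coding-Practice | 80_empty_chocolates.py | pack_chocolates
-- ===== SOURCE A (Python) =====
-- from collections import deque
--
-- def pack_chocolates(arr):
--     que = deque(arr)
--     for _ in range(len(que)):
--         if que[0] == 0:
--             que.rotate(-1)
--         else:
--             que.rotate(1)
--     return list(que)
-- ===== SOURCE B (Python) =====
-- def pack_chocolates(arr):
--     # Closed-form run-length analysis instead of simulating n rotations:
--     # the front index walks backward through the leading nonzeros, then forward
--     # through the following zero run, then oscillates between the last zero and
--     # the first nonzero; the remaining step count's parity fixes the final front.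
--     n = len(arr)
--     if n == 0:
--         return []
--     b = 0
--     while b < n and arr[(-b) % n] != 0:
--         b += 1
--     s = n - b
--     start = (-b) % n
--     f = 0
--     while f < s and arr[(start + f) % n] == 0:
--         f += 1
--     r = s - f
--     p = -b + f - (r % 2)
--     return [arr[(p + i) % n] for i in range(n)]
-- ===== Notes on version B (the rewrite author's own statement) =====
-- stated objective: alternative
-- what changed: B does not simulate the n rotation steps at all: it analyzes the array's run structure in closed form (length b of the leading nonzero run scanned backward from index 0, length f of the following zero run scanned forward, then the parity of the remaining step count r, since the walk provably oscillates between the last zero and the first nonzero) and rebuilds the answer once from the resulting rotation amount.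
import Mathlib
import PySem

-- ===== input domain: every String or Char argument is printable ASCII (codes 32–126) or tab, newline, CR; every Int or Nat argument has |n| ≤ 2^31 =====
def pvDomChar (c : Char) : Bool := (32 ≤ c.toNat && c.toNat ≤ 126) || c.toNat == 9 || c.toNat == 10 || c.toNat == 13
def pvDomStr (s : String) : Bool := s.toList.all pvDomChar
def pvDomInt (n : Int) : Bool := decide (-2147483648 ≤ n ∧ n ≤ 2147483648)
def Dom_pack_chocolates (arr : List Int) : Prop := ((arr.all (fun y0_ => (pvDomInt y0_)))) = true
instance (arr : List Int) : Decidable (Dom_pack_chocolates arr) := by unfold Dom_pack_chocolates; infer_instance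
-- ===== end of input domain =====

-- B replaces A's n-step rotation simulation by a closed-form run-length analysis
-- (backward nonzero run, forward zero run, parity of the rest) and one reconstruction
-- (objective: alternative, same asymptotic cost).

-- ===== PORT A =====
-- A's deque is ported as the standard two-list functional deque (front, reversed back);
-- the held sequence is front ++ back.reverse.  Each Python deque step is one port step.
-- rebalance helpers: when one side empties, split the content in half (same held sequence)
def pvSplit (l : List Int) : List Int × List Int :=
  (l.take ((l.length + 1) / 2), (l.drop ((l.length + 1) / 2)).reverse)
def pvSplitR (l : List Int) : List Int × List Int :=
  (l.take (l.length / 2), (l.drop (l.length / 2)).reverse)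

-- move the front element to the back / the back element to the front (one deque step)
def pvStepL : List Int × List Int → List Int × List Int
  | (x :: f, r) => (f, x :: r)
  | ([], r) => ([], r)
def pvStepR : List Int × List Int → List Int × List Int
  | (f, y :: r) => (y :: f, r)
  | (f, []) => (f, [])

-- deque.rotate(-1) / deque.rotate(1), rebalancing first if the popped side is empty
def pvRotL (d : List Int × List Int) : List Int × List Int :=
  if d.1.isEmpty then pvStepL (pvSplit d.2.reverse) else pvStepL d
def pvRotR (d : List Int × List Int) : List Int × List Int :=
  if d.2.isEmpty then pvStepR (pvSplitR d.1) else pvStepR d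

-- que[0] (none = IndexError on the empty deque; the loop never queries an empty deque)
def pvFront? (d : List Int × List Int) : Option Int :=
  match d.1 with
  | x :: _ => some x
  | [] => d.2.reverse.head?

-- list(que): the sequence the deque holds
def pvToList (d : List Int × List Int) : List Int := d.1 ++ d.2.reverse

-- the for-loop: len(que) iterations, each rotating the deque depending on que[0]
def pvPackALoop : Nat → List Int × List Int → List Int × List Int
  | 0, que => que
  | k + 1, que =>
      pvPackALoop k (if pvFront? que = some 0 then pvRotL que else pvRotR que)

def pack_chocolates (arr : List Int) : List Int :=
  pvToList (pvPackALoop arr.length (arr, []))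

-- ===== PORT B =====
-- while b < n and arr[(-b) % n] != 0: b += 1   (fuel = n - b, so fuel > 0 ↔ b < n)
def pvBackLoop (arr : List Int) (n : Int) : Nat → Nat → Nat
  | 0, b => b
  | fuel + 1, b =>
      if ¬ (PySem.List.pyGet? arr (PySem.Int.mod (-(b : Int)) n) = some 0)
      then pvBackLoop arr n fuel (b + 1) else b

-- while f < s and arr[(start + f) % n] == 0: f += 1   (fuel = s - f)
def pvFwdLoop (arr : List Int) (n start : Int) : Nat → Nat → Nat
  | 0, f => f
  | fuel + 1, f =>
      if PySem.List.pyGet? arr (PySem.Int.mod (start + (f : Int)) n) = some 0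
      then pvFwdLoop arr n start fuel (f + 1) else f

def pack_chocolates_alt (arr : List Int) : List Int :=
  let n : Int := arr.length
  if n = 0 then []
  else
    let b := pvBackLoop arr n arr.length 0
    let s := arr.length - b
    let start := PySem.Int.mod (-(b : Int)) n
    let f := pvFwdLoop arr n start s 0
    let r := s - f
    let p : Int := -(b : Int) + (f : Int) - ((r % 2 : Nat) : Int)
    -- the index (p + i) % n is always in [0, n), so the .getD default is never used
    (PySem.List.pyRange 0 n 1).map
      (fun i => (PySem.List.pyGet? arr (PySem.Int.mod (p + i) n)).getD 0)

-- ===== PRECONDITION & SPEC =====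
def Spec_pack_chocolates (arr : List Int) (out : List Int) : Prop := out = pack_chocolates_alt arr
instance (arr : List Int) (out : List Int) : Decidable (Spec_pack_chocolates arr out) := by unfold Spec_pack_chocolates; infer_instance

-- ===== CLAIM (what is proved, stated in full; the proofs are below) =====
def Claim_equal_pack_chocolates : Prop := ∀ (arr : List Int), Dom_pack_chocolates arr → Spec_pack_chocolates arr (pack_chocolates arr)

-- ===== LEMMAS AND PROOFS =====

-- canonical rotation amount in [0, len)
def pvIdx (len : Nat) (x : Int) : Nat := (x % (len : Int)).toNat

theorem pvIdx_cast (len : Nat) (hlen : 0 < len) (x : Int) :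
    ((pvIdx len x : Nat) : Int) = x % (len : Int) := by
  unfold pvIdx
  exact Int.toNat_of_nonneg (Int.emod_nonneg x (by exact_mod_cast hlen.ne'))

theorem pvIdx_lt (len : Nat) (hlen : 0 < len) (x : Int) : pvIdx len x < len := by
  have h := Int.emod_lt_of_pos x (b := (len : Int)) (by exact_mod_cast hlen)
  unfold pvIdx
  omega

-- a Nat congruent mod len to y is y's canonical index
theorem pvIdx_of_mod_eq (len : Nat) (hlen : 0 < len) (a : Nat) (y : Int)
    (h : (a : Int) % (len : Int) = y % (len : Int)) : a % len = pvIdx len y := by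
  have h1 : ((a % len : Nat) : Int) = ((pvIdx len y : Nat) : Int) := by
    rw [pvIdx_cast len hlen, Int.natCast_mod, h]
  exact_mod_cast h1

theorem pvIdx_add_one (len : Nat) (hlen : 0 < len) (x : Int) :
    (pvIdx len x + 1) % len = pvIdx len (x + 1) := by
  apply pvIdx_of_mod_eq len hlen
  push_cast
  rw [pvIdx_cast len hlen]
  have : x + 1 = (x % (len : Int) + 1) + (len : Int) * (x / (len : Int)) := by
    have hd := Int.emod_add_mul_ediv x (len : Int)
    linarith
  rw [this, Int.add_mul_emod_self_left]

theorem pvIdx_add_pred (len : Nat) (hlen : 0 < len) (x : Int) :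
    (pvIdx len x + (len - 1)) % len = pvIdx len (x - 1) := by
  apply pvIdx_of_mod_eq len hlen
  have hc : (((len - 1 : Nat)) : Int) = (len : Int) - 1 := by omega
  push_cast [hc]
  rw [pvIdx_cast len hlen]
  have hd := Int.emod_add_mul_ediv x (len : Int)
  have : x % (len : Int) + ((len : Int) - 1) = (x - 1) + (len : Int) * (1 - x / (len : Int)) := by
    ring_nf; linarith
  rw [this, Int.add_mul_emod_self_left]

theorem pvIdx_nat_add (len : Nat) (hlen : 0 < len) (k : Nat) (p : Int) :
    (k + pvIdx len p) % len = pvIdx len (p + k) := by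
  apply pvIdx_of_mod_eq len hlen
  push_cast
  rw [pvIdx_cast len hlen]
  have hd := Int.emod_add_mul_ediv p (len : Int)
  have : (k : Int) + p % (len : Int) = (p + (k : Int)) + (len : Int) * (-(p / (len : Int))) := by
    linarith
  rw [this, Int.add_mul_emod_self_left]

-- lookup bridges: the ports' Python index expressions name the canonical index
theorem pvBridge (arr : List Int) (hlen : 0 < arr.length) (x : Int) :
    PySem.List.pyGet? arr (PySem.Int.mod x (arr.length : Int)) = arr[pvIdx arr.length x]? := by
  rw [PySem.Int.mod_eq_emod_of_pos (by exact_mod_cast hlen), ← pvIdx_cast arr.length hlen,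
    PySem.List.pyGet?_natCast]

theorem pvBridge2 (arr : List Int) (hlen : 0 < arr.length) (x f : Int) :
    PySem.List.pyGet? arr
        (PySem.Int.mod (PySem.Int.mod x (arr.length : Int) + f) (arr.length : Int)) =
      arr[pvIdx arr.length (x + f)]? := by
  have hin : PySem.Int.mod x (arr.length : Int) = x % (arr.length : Int) :=
    PySem.Int.mod_eq_emod_of_pos (by exact_mod_cast hlen)
  have hx : x % (arr.length : Int) + f = (x + f) + (arr.length : Int) * (-(x / (arr.length : Int))) := by
    have hd := Int.emod_add_mul_ediv x (arr.length : Int)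
    linarith
  have hmod : PySem.Int.mod (x % (arr.length : Int) + f) (arr.length : Int) =
      PySem.Int.mod (x + f) (arr.length : Int) := by
    rw [PySem.Int.mod_eq_emod_of_pos (by exact_mod_cast hlen),
      PySem.Int.mod_eq_emod_of_pos (by exact_mod_cast hlen), hx, Int.add_mul_emod_self_left]
  rw [hin, hmod, pvBridge arr hlen]

-- the two-list deque holds the right sequence through each operation
theorem pvToList_split (l : List Int) : pvToList (pvSplit l) = l := by
  simp [pvToList, pvSplit]

theorem pvToList_splitR (l : List Int) : pvToList (pvSplitR l) = l := by
  simp [pvToList, pvSplitR]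

theorem pvSplit_fst_ne (l : List Int) (h : l ≠ []) : (pvSplit l).1 ≠ [] := by
  cases l with
  | nil => exact absurd rfl h
  | cons a t => simp [pvSplit]

theorem pvSplitR_snd_ne (l : List Int) (h : l ≠ []) : (pvSplitR l).2 ≠ [] := by
  simp only [pvSplitR, ne_eq, List.reverse_eq_nil_iff, List.drop_eq_nil_iff]
  have : 0 < l.length := List.length_pos_iff.mpr h
  omega

theorem pvStepL_toList (d : List Int × List Int) (h : d.1 ≠ []) :
    pvToList (pvStepL d) = (pvToList d).rotate 1 := by
  obtain ⟨f, r⟩ := d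
  cases f with
  | nil => exact absurd rfl h
  | cons x f =>
      simp only [pvStepL, pvToList, List.reverse_cons]
      simp

theorem pvStepR_toList (d : List Int × List Int) (h : d.2 ≠ []) :
    pvToList (pvStepR d) = (pvToList d).rotate ((pvToList d).length - 1) := by
  obtain ⟨f, r⟩ := d
  cases r with
  | nil => exact absurd rfl h
  | cons y r =>
      simp only [pvStepR, pvToList, List.reverse_cons]
      have hM : f ++ (r.reverse ++ [y]) = (f ++ r.reverse) ++ [y] := by simp
      rw [hM]
      have hlen : ((f ++ r.reverse) ++ [y]).length - 1 = (f ++ r.reverse).length := by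
        simp
      rw [hlen, List.rotate_eq_drop_append_take (by simp)]
      rw [List.drop_left, List.take_left]
      rfl

theorem pvRotL_toList (d : List Int × List Int) :
    pvToList (pvRotL d) = (pvToList d).rotate 1 := by
  by_cases hf : d.1.isEmpty
  · have hf' : d.1 = [] := List.isEmpty_iff.mp hf
    by_cases hr : d.2.reverse = []
    · simp [pvRotL, hf', hr, pvToList, pvSplit, pvStepL]
    · rw [pvRotL, if_pos hf, pvStepL_toList _ (pvSplit_fst_ne _ hr), pvToList_split,
        pvToList, hf', List.nil_append]
  · rw [pvRotL, if_neg hf, pvStepL_toList _ (by simpa using hf)]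

theorem pvRotR_toList (d : List Int × List Int) :
    pvToList (pvRotR d) = (pvToList d).rotate ((pvToList d).length - 1) := by
  by_cases hr : d.2.isEmpty
  · have hr' : d.2 = [] := List.isEmpty_iff.mp hr
    by_cases hf : d.1 = []
    · simp [pvRotR, hr', hf, pvToList, pvSplitR, pvStepR]
    · rw [pvRotR, if_pos hr, pvStepR_toList _ (pvSplitR_snd_ne _ hf), pvToList_splitR]
      rw [pvToList, hr']
      simp
  · rw [pvRotR, if_neg hr, pvStepR_toList _ (by simpa using hr)]

theorem pvFront?_toList (d : List Int × List Int) :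
    pvFront? d = (pvToList d).head? := by
  obtain ⟨f, r⟩ := d
  cases f with
  | nil => simp [pvFront?, pvToList]
  | cons x f => simp [pvFront?, pvToList]

theorem front_rotate (arr : List Int) (m : Nat) (hm : m < arr.length) :
    (arr.rotate m).head? = some arr[m] := by
  rw [List.head?_rotate hm, List.getElem?_eq_getElem hm]

-- the abstract walk A's front index performs: +1 on a zero front, -1 otherwise
def pvW (arr : List Int) : Nat → Int → Int
  | 0, p => p
  | k + 1, p =>
      pvW arr k (if arr[pvIdx arr.length p]? = some 0 then p + 1 else p - 1)

-- A's loop realises the walk on rotations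
theorem loop_simA (arr : List Int) (hne : arr ≠ []) :
    ∀ (k : Nat) (d : List Int × List Int) (p : Int),
      pvToList d = arr.rotate (pvIdx arr.length p) →
      pvToList (pvPackALoop k d) = arr.rotate (pvIdx arr.length (pvW arr k p)) := by
  intro k
  induction k with
  | zero => intro d p h; exact h
  | succ k ih =>
      intro d p h
      have hlen : 0 < arr.length := List.length_pos_iff.mpr hne
      have hm := pvIdx_lt arr.length hlen p
      have hcond : pvFront? d = arr[pvIdx arr.length p]? := by
        rw [pvFront?_toList, h, front_rotate arr _ hm, List.getElem?_eq_getElem hm]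
      rw [pvPackALoop, pvW, hcond]
      by_cases hz : arr[pvIdx arr.length p]? = some 0
      · rw [if_pos hz, if_pos hz]
        apply ih _ (p + 1)
        rw [pvRotL_toList, h, List.rotate_rotate, ← List.rotate_mod,
          pvIdx_add_one arr.length hlen]
      · rw [if_neg hz, if_neg hz]
        apply ih _ (p - 1)
        rw [pvRotR_toList, h, List.length_rotate, List.rotate_rotate, ← List.rotate_mod,
          pvIdx_add_pred arr.length hlen]

-- the walk composes
theorem pvW_comp (arr : List Int) :
    ∀ (a c : Nat) (p : Int), pvW arr (a + c) p = pvW arr c (pvW arr a p) := by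
  intro a
  induction a with
  | zero => intro c p; simp [pvW]
  | succ a ih =>
      intro c p
      have : a + 1 + c = (a + c) + 1 := by omega
      rw [this, pvW, pvW, ih]

-- backward phase: through nonzeros the walk retreats one per step
theorem pvW_back (arr : List Int) :
    ∀ (k : Nat) (p : Int),
      (∀ j : Nat, j < k → arr[pvIdx arr.length (p - j)]? ≠ some 0) →
      pvW arr k p = p - k := by
  intro k
  induction k with
  | zero => intro p _; simp [pvW]
  | succ k ih =>
      intro p h
      have h0 : arr[pvIdx arr.length p]? ≠ some 0 := by
        have := h 0 (by omega)
        simpa using this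
      rw [pvW, if_neg h0, ih]
      · push_cast; ring
      · intro j hj
        have := h (j + 1) (by omega)
        have hc : p - 1 - (j : Int) = p - ((j : Nat) + 1 : Nat) := by push_cast; ring
        rw [hc]
        exact this

-- forward phase: through zeros the walk advances one per step
theorem pvW_fwd (arr : List Int) :
    ∀ (k : Nat) (p : Int),
      (∀ j : Nat, j < k → arr[pvIdx arr.length (p + j)]? = some 0) →
      pvW arr k p = p + k := by
  intro k
  induction k with
  | zero => intro p _; simp [pvW]
  | succ k ih =>
      intro p h
      have h0 : arr[pvIdx arr.length p]? = some 0 := by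
        have := h 0 (by omega)
        simpa using this
      rw [pvW, if_pos h0, ih]
      · push_cast; ring
      · intro j hj
        have := h (j + 1) (by omega)
        have hc : p + 1 + (j : Int) = p + ((j : Nat) + 1 : Nat) := by push_cast; ring
        rw [hc]
        exact this

-- oscillation phase: nonzero at p, zero at p-1 — the walk bounces, parity decides
theorem pvW_osc (arr : List Int) (p : Int)
    (hnz : arr[pvIdx arr.length p]? ≠ some 0)
    (hz : arr[pvIdx arr.length (p - 1)]? = some 0) :
    ∀ (r : Nat), pvW arr r p = p - ((r % 2 : Nat) : Int) := by
  intro r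
  induction r using Nat.twoStepInduction with
  | zero => simp [pvW]
  | one => rw [pvW, if_neg hnz]; simp [pvW]
  | more r ih _ =>
      have h1 : pvW arr (r + 2) p = pvW arr r p := by
        rw [pvW, if_neg hnz, pvW, if_pos hz]
        norm_num
      rw [h1, ih]
      congr 2
      omega

-- the backward while-loop finds the leading nonzero run
theorem back_spec (arr : List Int) (hlen : 0 < arr.length) :
    ∀ (fuel b : Nat),
      (∀ j : Nat, j < b → arr[pvIdx arr.length (-(j : Int))]? ≠ some 0) →
      b ≤ pvBackLoop arr (arr.length : Int) fuel b ∧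
      pvBackLoop arr (arr.length : Int) fuel b ≤ b + fuel ∧
      (∀ j : Nat, j < pvBackLoop arr (arr.length : Int) fuel b →
        arr[pvIdx arr.length (-(j : Int))]? ≠ some 0) ∧
      (pvBackLoop arr (arr.length : Int) fuel b < b + fuel →
        arr[pvIdx arr.length (-(pvBackLoop arr (arr.length : Int) fuel b : Int))]? = some 0) := by
  intro fuel
  induction fuel with
  | zero =>
      intro b h
      refine ⟨le_refl _, by simp [pvBackLoop], by simpa [pvBackLoop] using h, ?_⟩
      simp [pvBackLoop]
  | succ fuel ih =>
      intro b h
      rw [pvBackLoop]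
      by_cases hc : PySem.List.pyGet? arr (PySem.Int.mod (-(b : Int)) (arr.length : Int)) = some 0
      · rw [if_neg (by simpa using hc)]
        refine ⟨le_refl _, by omega, h, ?_⟩
        intro _
        rw [← pvBridge arr hlen]
        exact hc
      · rw [if_pos (by simpa using hc)]
        have h' : ∀ j : Nat, j < b + 1 → arr[pvIdx arr.length (-(j : Int))]? ≠ some 0 := by
          intro j hj
          rcases Nat.lt_succ_iff_lt_or_eq.mp hj with hj' | hj'
          · exact h j hj'
          · subst hj'
            rw [← pvBridge arr hlen]
            exact hc
        obtain ⟨h1, h2, h3, h4⟩ := ih (b + 1) h'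
        exact ⟨by omega, by omega, h3, fun hlt => h4 (by omega)⟩

-- the forward while-loop finds the following zero run
theorem fwd_spec (arr : List Int) (hlen : 0 < arr.length) (b : Nat) :
    ∀ (fuel f : Nat),
      (∀ j : Nat, j < f → arr[pvIdx arr.length (-(b : Int) + j)]? = some 0) →
      f ≤ pvFwdLoop arr (arr.length : Int) (PySem.Int.mod (-(b : Int)) (arr.length : Int)) fuel f ∧
      pvFwdLoop arr (arr.length : Int) (PySem.Int.mod (-(b : Int)) (arr.length : Int)) fuel f ≤ f + fuel ∧
      (∀ j : Nat, j < pvFwdLoop arr (arr.length : Int) (PySem.Int.mod (-(b : Int)) (arr.length : Int)) fuel f →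
        arr[pvIdx arr.length (-(b : Int) + j)]? = some 0) ∧
      (pvFwdLoop arr (arr.length : Int) (PySem.Int.mod (-(b : Int)) (arr.length : Int)) fuel f < f + fuel →
        arr[pvIdx arr.length (-(b : Int) + (pvFwdLoop arr (arr.length : Int) (PySem.Int.mod (-(b : Int)) (arr.length : Int)) fuel f : Int))]? ≠ some 0) := by
  intro fuel
  induction fuel with
  | zero =>
      intro f h
      refine ⟨le_refl _, by simp [pvFwdLoop], by simpa [pvFwdLoop] using h, ?_⟩
      simp [pvFwdLoop]
  | succ fuel ih =>
      intro f h
      rw [pvFwdLoop]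
      by_cases hc : PySem.List.pyGet? arr
          (PySem.Int.mod (PySem.Int.mod (-(b : Int)) (arr.length : Int) + (f : Int)) (arr.length : Int)) = some 0
      · rw [if_pos hc]
        have h' : ∀ j : Nat, j < f + 1 → arr[pvIdx arr.length (-(b : Int) + j)]? = some 0 := by
          intro j hj
          rcases Nat.lt_succ_iff_lt_or_eq.mp hj with hj' | hj'
          · exact h j hj'
          · subst hj'
            rw [← pvBridge2 arr hlen]
            exact hc
        obtain ⟨h1, h2, h3, h4⟩ := ih (f + 1) h'
        exact ⟨by omega, by omega, h3, fun hlt => h4 (by omega)⟩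
      · rw [if_neg hc]
        refine ⟨le_refl _, by omega, h, ?_⟩
        intro _
        rw [← pvBridge2 arr hlen]
        exact hc

-- B's final comprehension is a canonical rotation
theorem recon (arr : List Int) (hne : arr ≠ []) (p : Int) :
    (PySem.List.pyRange 0 (arr.length : Int) 1).map
        (fun i => (PySem.List.pyGet? arr (PySem.Int.mod (p + i) (arr.length : Int))).getD 0) =
      arr.rotate (pvIdx arr.length p) := by
  have hlen : 0 < arr.length := List.length_pos_iff.mpr hne
  rw [PySem.List.pyRange_one]
  apply List.ext_getElem
  · simp [List.length_rotate]
  · intro k h1 h2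
    have hk : k < arr.length := by simpa [List.length_rotate] using h2
    simp only [List.getElem_map, List.getElem_range, List.getElem_rotate]
    have hc : p + ((0 : Int) + (k : Int)) = p + (k : Int) := by ring
    rw [hc, pvBridge arr hlen, List.getElem?_eq_getElem (pvIdx_lt arr.length hlen _),
      Option.getD_some]
    have he := pvIdx_nat_add arr.length hlen k p
    simp only [← he]

-- the walk's endpoint is B's closed form
theorem walk_closed (arr : List Int) (hne : arr ≠ []) :
    pvW arr arr.length 0 =
      -(pvBackLoop arr (arr.length : Int) arr.length 0 : Int) +
        ((pvFwdLoop arr (arr.length : Int)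
            (PySem.Int.mod (-(pvBackLoop arr (arr.length : Int) arr.length 0 : Int)) (arr.length : Int))
            (arr.length - pvBackLoop arr (arr.length : Int) arr.length 0) 0 : Nat) : Int) -
        ((((arr.length - pvBackLoop arr (arr.length : Int) arr.length 0 -
            pvFwdLoop arr (arr.length : Int)
              (PySem.Int.mod (-(pvBackLoop arr (arr.length : Int) arr.length 0 : Int)) (arr.length : Int))
              (arr.length - pvBackLoop arr (arr.length : Int) arr.length 0) 0) % 2 : Nat)) : Int) := by
  have hlen : 0 < arr.length := List.length_pos_iff.mpr hne
  obtain ⟨hb1, hb2, hball, hbstop⟩ := back_spec arr hlen arr.length 0 (by omega)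
  set b := pvBackLoop arr (arr.length : Int) arr.length 0 with hbdef
  obtain ⟨hf1, hf2, hfall, hfstop⟩ := fwd_spec arr hlen b (arr.length - b) 0 (by omega)
  set f := pvFwdLoop arr (arr.length : Int)
      (PySem.Int.mod (-(b : Int)) (arr.length : Int)) (arr.length - b) 0 with hfdef
  set r := arr.length - b - f with hrdef
  have hn : arr.length = b + (f + r) := by omega
  rw [hn, pvW_comp, pvW_comp]
  have hwb : pvW arr b 0 = -(b : Int) := by
    rw [pvW_back arr b 0 (by intro j hj; simpa using hball j hj)]
    simp
  rw [hwb]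
  have hwf : pvW arr f (-(b : Int)) = -(b : Int) + f :=
    pvW_fwd arr f (-(b : Int)) (fun j hj => hfall j hj)
  rw [hwf]
  by_cases hr : r = 0
  · simp [hr, pvW]
  · have hs : 0 < arr.length - b := by omega
    have hbn : b < arr.length := by omega
    have hz0 : arr[pvIdx arr.length (-(b : Int))]? = some 0 := hbstop (by omega)
    have hflt : f < arr.length - b := by omega
    have hnz : arr[pvIdx arr.length (-(b : Int) + f)]? ≠ some 0 := hfstop (by omega)
    have hf1' : 1 ≤ f := by
      by_contra hf0
      have hf0' : f = 0 := by omega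
      apply hnz
      rw [hf0']
      simpa using hz0
    have hz : arr[pvIdx arr.length ((-(b : Int) + f) - 1)]? = some 0 := by
      have hc : (-(b : Int) + f) - 1 = -(b : Int) + ((f - 1 : Nat) : Int) := by omega
      rw [hc]
      exact hfall (f - 1) (by omega)
    rw [pvW_osc arr (-(b : Int) + f) hnz hz r]

-- ===== VERDICT (by name: the statement is the Claim_ definition above) =====
theorem pack_chocolates_spec : Claim_equal_pack_chocolates := by
  intro arr _
  unfold Spec_pack_chocolates pack_chocolates pack_chocolates_alt
  by_cases hne : arr = []
  · subst hne; rfl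
  · have hlen : 0 < arr.length := List.length_pos_iff.mpr hne
    have hne' : ((arr.length : Int)) ≠ 0 := by exact_mod_cast hlen.ne'
    simp only [hne', ite_false]
    rw [recon arr hne, loop_simA arr hne arr.length (arr, []) 0 (by simp [pvToList, pvIdx]),
      walk_closed arr hne]
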